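-- pv_equiv track=rewrite | github.com/AlonsoMata/AI-Sentiment-Analysis | SVM_BERT_script.py | get_exclusive_important_words
-- ===== SOURCE A (Python) =====
-- def get_exclusive_important_words(important_words_summary):
--     # Identificar palabras comunes entre sentimientos
--     common_words = set()
--     all_sentiments = list(important_words_summary.keys())
--
--     for i, sentiment in enumerate(all_sentiments):
--         other_sentiments = all_sentiments[:i] + all_sentiments[i+1:]
--         words_current_sentiment = set(word for word, _ in important_words_summary[sentiment])
--
--         for other in other_sentiments:
--             words_other_sentiment = set(word for word, _ in important_words_summary[other])
--             common_words.update(words_current_sentiment.intersection(words_other_sentiment))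
--
--     # Excluir palabras comunes y devolver las 10 palabras exclusivas más importantes por sentimiento
--     exclusive_important_words = {}
--
--     for sentiment, words in important_words_summary.items():
--         exclusive_words = sorted([(word, count) for word, count in words if word not in common_words], key=lambda x: x[1], reverse=True)[:10]
--         exclusive_important_words[sentiment] = exclusive_words
--
--     return exclusive_important_words
-- ===== SOURCE B (Python) =====
-- def get_exclusive_important_words(important_words_summary):
--     # One pass: count in how many sentiments each word occurs (distinct per sentiment).
--     counts = {}
--     for words in important_words_summary.values():
--         for word in dict.fromkeys(word for word, _ in words):
--             counts[word] = counts.get(word, 0) + 1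
--     # A word is exclusive to a sentiment iff it occurs in exactly one sentiment.
--     return {
--         sentiment: sorted(
--             [(word, count) for word, count in words if counts[word] == 1],
--             key=lambda x: x[1], reverse=True
--         )[:10]
--         for sentiment, words in important_words_summary.items()
--     }
-- ===== Notes on version B (the rewrite author's own statement) =====
-- stated objective: faster
-- what changed: Instead of intersecting every pair of sentiments' word sets (O(S^2) set intersections), B makes one pass counting in how many sentiments each word occurs and keeps a word iff that count is 1.
import Mathlib
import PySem

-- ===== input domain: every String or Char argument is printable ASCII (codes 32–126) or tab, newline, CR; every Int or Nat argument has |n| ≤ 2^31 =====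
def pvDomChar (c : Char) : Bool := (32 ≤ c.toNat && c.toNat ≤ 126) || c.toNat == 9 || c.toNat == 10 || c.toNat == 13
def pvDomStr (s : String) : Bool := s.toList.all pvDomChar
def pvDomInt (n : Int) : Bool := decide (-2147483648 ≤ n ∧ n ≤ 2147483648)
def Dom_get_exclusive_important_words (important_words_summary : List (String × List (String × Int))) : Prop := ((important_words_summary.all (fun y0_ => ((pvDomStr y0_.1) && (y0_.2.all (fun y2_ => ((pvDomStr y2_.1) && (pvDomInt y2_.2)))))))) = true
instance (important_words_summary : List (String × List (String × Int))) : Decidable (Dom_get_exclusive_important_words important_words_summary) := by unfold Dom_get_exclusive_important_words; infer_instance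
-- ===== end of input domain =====

-- B replaces A's pairwise intersection of every two sentiments' word sets by a single pass that
-- counts, per word, the number of sentiments containing it (objective: faster).


-- ===== PORT A =====
-- Literal port of A. The dict parameter is its association list; 'important_words_summary[s]' is
-- 'd.getD s []' — under Pre_ the looked-up key is always a key of d, so the default is never used.
def get_exclusive_important_words (important_words_summary : List (String × List (String × Int))) : List (String × List (String × Int)) :=
  let d := PySem.Dict.mk important_words_summary
  let all_sentiments := d.keys
  let common_words : PySem.Set String :=
    (PySem.List.enumerate all_sentiments).foldl (fun c is =>
      let other_sentiments :=
        PySem.List.slice all_sentiments none (some is.1) ++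
        PySem.List.slice all_sentiments (some (is.1 + 1)) none
      let words_current_sentiment := PySem.Set.ofList ((d.getD is.2 []).map (fun q => q.1))
      other_sentiments.foldl (fun c other =>
        let words_other_sentiment := PySem.Set.ofList ((d.getD other []).map (fun q => q.1))
        PySem.Set.update c (PySem.Set.inter words_current_sentiment words_other_sentiment)) c)
      PySem.Set.empty
  (important_words_summary.foldl
    (fun (r : PySem.Dict String (List (String × Int))) p =>
      r.insert p.1
        (PySem.List.slice
          (PySem.List.sorted (p.2.filter (fun q => !(PySem.Set.contains common_words q.1)))
            (fun q => q.2) true)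
          none (some 10)))
    PySem.Dict.empty).items

-- ===== PORT B =====
-- Literal port of Source B; 'counts[word]' is 'counts.getD q.1 0' — the key is always present there.
def get_exclusive_important_words_alt (important_words_summary : List (String × List (String × Int))) : List (String × List (String × Int)) :=
  let counts : PySem.Dict String Int :=
    important_words_summary.foldl (fun cd p =>
      (PySem.List.dedup (p.2.map (fun q => q.1))).foldl
        (fun cd w => cd.insert w (cd.getD w 0 + 1)) cd)
      PySem.Dict.empty
  (important_words_summary.foldl
    (fun (r : PySem.Dict String (List (String × Int))) p =>
      r.insert p.1
        (PySem.List.slice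
          (PySem.List.sorted (p.2.filter (fun q => counts.getD q.1 0 == 1))
            (fun q => q.2) true)
          none (some 10)))
    PySem.Dict.empty).items

-- ===== PRECONDITION & SPEC =====
-- Pre_ excludes association lists with duplicate sentiment keys: a Python dict cannot contain
-- them, so their assoc-list reading is an artefact of the encoding, not a behaviour of A.
def Pre_get_exclusive_important_words (important_words_summary : List (String × List (String × Int))) : Prop :=
  (important_words_summary.map (fun p => p.1)).Nodup
instance (important_words_summary : List (String × List (String × Int))) : Decidable (Pre_get_exclusive_important_words important_words_summary) := by unfold Pre_get_exclusive_important_words; infer_instance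

def pvWitness_get_exclusive_important_words : (List (String × List (String × Int))) :=
  [("pos", [("good", 3), ("fine", 1), ("nice", 2)]), ("neg", [("bad", 5), ("good", 2)])]

def Spec_get_exclusive_important_words (important_words_summary : List (String × List (String × Int))) (out : List (String × List (String × Int))) : Prop := out = get_exclusive_important_words_alt important_words_summary
instance (important_words_summary : List (String × List (String × Int))) (out : List (String × List (String × Int))) : Decidable (Spec_get_exclusive_important_words important_words_summary out) := by unfold Spec_get_exclusive_important_words; infer_instance

-- ===== CLAIM =====
def Claim_equal_get_exclusive_important_words : Prop := ∀ (important_words_summary : List (String × List (String × Int))), Dom_get_exclusive_important_words important_words_summary → Pre_get_exclusive_important_words important_words_summary → Spec_get_exclusive_important_words important_words_summary (get_exclusive_important_words important_words_summary)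

-- ===== LEMMAS AND PROOFS =====

-- pvCnt xs w = in how many entries of xs does the word w occur.
def pvCnt (xs : List (String × List (String × Int))) (w : String) : Nat :=
  xs.countP (fun p => decide (w ∈ p.2.map (fun q => q.1)))

theorem counts_getD (xs : List (String × List (String × Int)))
    (cd : PySem.Dict String Int) (w : String) :
    (xs.foldl (fun cd p =>
      (PySem.List.dedup (p.2.map (fun q => q.1))).foldl
        (fun cd w => cd.insert w (cd.getD w 0 + 1)) cd) cd).getD w 0
    = cd.getD w 0 + (pvCnt xs w : Int) := by
  induction xs generalizing cd with
  | nil => simp [pvCnt]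
  | cons p xs ih =>
    simp only [List.foldl_cons, ih, PySem.Dict.getD_foldl_insert_add_one, pvCnt,
      List.countP_cons]
    have hcount : (PySem.List.dedup (p.2.map (fun q => q.1))).count w
        = (if w ∈ p.2.map (fun q => q.1) then 1 else 0) := by
      by_cases h : w ∈ p.2.map (fun q => q.1)
      · rw [if_pos h]
        exact List.count_eq_one_of_mem (PySem.List.nodup_dedup _)
          ((PySem.List.mem_dedup _ _).2 h)
      · rw [if_neg h]
        exact List.count_eq_zero_of_not_mem (fun hc => h ((PySem.List.mem_dedup _ _).1 hc))
    rw [hcount]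
    by_cases h : w ∈ p.2.map (fun q => q.1) <;> simp [h] <;> ring

theorem mem_foldl_step {α β : Type} [BEq β] (l : List α)
    (step : PySem.Set β → α → PySem.Set β) (Q : α → β → Prop)
    (h : ∀ c a w, w ∈ step c a ↔ w ∈ c ∨ Q a w) :
    ∀ (c : PySem.Set β) (w : β), w ∈ l.foldl step c ↔ w ∈ c ∨ ∃ a ∈ l, Q a w := by
  induction l with
  | nil => simp
  | cons a l ih =>
    intro c w
    simp only [List.foldl_cons, ih, h, List.mem_cons]
    constructor
    · rintro ((hc | hq) | ⟨b, hb, hQ⟩)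
      · exact Or.inl hc
      · exact Or.inr ⟨a, Or.inl rfl, hq⟩
      · exact Or.inr ⟨b, Or.inr hb, hQ⟩
    · rintro (hc | ⟨b, (rfl | hb), hQ⟩)
      · exact Or.inl (Or.inl hc)
      · exact Or.inl (Or.inr hQ)
      · exact Or.inr ⟨b, hb, hQ⟩

theorem mem_enumerate {α : Type} (xs : List α) (s : Int) (p : Int × α) :
    p ∈ PySem.List.enumerate xs s ↔
    ∃ k : Nat, ∃ hk : k < xs.length, p.1 = s + k ∧ p.2 = xs[k] := by
  induction xs generalizing s with
  | nil => simp [PySem.List.enumerate]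
  | cons x xs ih =>
    rw [PySem.List.enumerate_cons]
    simp only [List.mem_cons, ih]
    constructor
    · rintro (rfl | ⟨k, hk, h1, h2⟩)
      · exact ⟨0, by simp, by simp⟩
      · exact ⟨k + 1, by simpa using hk, by push_cast; omega, by simpa using h2⟩
    · rintro ⟨k, hk, h1, h2⟩
      cases k with
      | zero =>
        left
        simp at h1 h2
        obtain ⟨a, b⟩ := p; simp_all
      | succ k =>
        right
        exact ⟨k, by simpa using hk, by push_cast at h1 ⊢; omega, by simpa using h2⟩

theorem mem_eraseIdx_nodup {α : Type} [DecidableEq α] (xs : List α) (k : Nat)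
    (hk : k < xs.length) (hnd : xs.Nodup) (o : α) :
    o ∈ xs.take k ++ xs.drop (k + 1) ↔ o ∈ xs ∧ o ≠ xs[k] := by
  have hdecomp : xs = xs.take k ++ xs[k] :: xs.drop (k + 1) := by
    conv_lhs => rw [← List.take_append_drop k xs]
    rw [List.drop_eq_getElem_cons hk]
  have hnd' : (xs.take k ++ xs[k] :: xs.drop (k + 1)).Nodup := hdecomp ▸ hnd
  rw [List.nodup_append] at hnd'
  obtain ⟨h1, h2, h3⟩ := hnd'
  rw [List.nodup_cons] at h2
  constructor
  · intro hm
    rw [List.mem_append] at hm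
    constructor
    · rw [hdecomp]
      rcases hm with hm | hm
      · exact List.mem_append_left _ hm
      · exact List.mem_append_right _ (List.mem_cons_of_mem _ hm)
    · rintro rfl
      rcases hm with hm | hm
      · exact h3 _ hm _ List.mem_cons_self rfl
      · exact h2.1 hm
  · rintro ⟨hm, hne⟩
    rw [hdecomp, List.mem_append, List.mem_cons] at hm
    rw [List.mem_append]
    rcases hm with hm | (rfl | hm)
    · exact Or.inl hm
    · exact absurd rfl hne
    · exact Or.inr hm

theorem two_le_countP_iff (xs : List (String × List (String × Int)))
    (hnd : (xs.map (fun p => p.1)).Nodup) (pr : (String × List (String × Int)) → Bool) :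
    2 ≤ xs.countP pr ↔
    ∃ p ∈ xs, ∃ q ∈ xs, p.1 ≠ q.1 ∧ pr p ∧ pr q := by
  have hsub : (xs.filter pr).Sublist xs := List.filter_sublist
  have hndf : ((xs.filter pr).map (fun p => p.1)).Nodup :=
    List.Nodup.sublist (List.Sublist.map _ hsub) hnd
  rw [List.countP_eq_length_filter]
  constructor
  · intro h2
    match hf : xs.filter pr with
    | [] => rw [hf] at h2; simp at h2
    | [a] => rw [hf] at h2; simp at h2
    | a :: b :: t =>
      have ha : a ∈ xs.filter pr := by rw [hf]; exact List.mem_cons_self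
      have hb : b ∈ xs.filter pr := by rw [hf]; exact List.mem_cons_of_mem _ List.mem_cons_self
      rw [hf] at hndf
      refine ⟨a, (List.mem_filter.1 ha).1, b, (List.mem_filter.1 hb).1, ?_,
        (List.mem_filter.1 ha).2, (List.mem_filter.1 hb).2⟩
      simp only [List.map_cons, List.nodup_cons, List.mem_cons] at hndf
      exact fun h => hndf.1 (Or.inl h)
  · rintro ⟨p, hp, q, hq, hne, hprp, hprq⟩
    have hpq : p ≠ q := fun h => hne (by rw [h])
    have hpf : p ∈ xs.filter pr := List.mem_filter.2 ⟨hp, hprp⟩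
    have hqf : q ∈ xs.filter pr := List.mem_filter.2 ⟨hq, hprq⟩
    obtain ⟨l1, l2, hdec⟩ := List.append_of_mem hpf
    rw [hdec] at hqf
    rw [List.mem_append, List.mem_cons] at hqf
    rw [hdec]
    rcases hqf with h | h | h
    · have := List.length_pos_of_mem h; simp; omega
    · exact absurd h.symm hpq
    · have := List.length_pos_of_mem h; simp; omega

theorem common_iff (xs : List (String × List (String × Int)))
    (hnd : (xs.map (fun p => p.1)).Nodup) (w : String) :
    (w ∈ (PySem.List.enumerate (PySem.Dict.mk xs).keys).foldl
        (fun c is =>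
          (PySem.List.slice (PySem.Dict.mk xs).keys none (some is.1) ++
           PySem.List.slice (PySem.Dict.mk xs).keys (some (is.1 + 1)) none).foldl
            (fun c other =>
              PySem.Set.update c
                ((PySem.Set.ofList (((PySem.Dict.mk xs).getD is.2 []).map (fun q => q.1))).inter
                 (PySem.Set.ofList (((PySem.Dict.mk xs).getD other []).map (fun q => q.1)))))
            c)
        PySem.Set.empty)
    ↔ 2 ≤ pvCnt xs w := by
  have hkeys : (PySem.Dict.mk xs).keys = xs.map (fun p => p.1) := by
    simp [PySem.Dict.keys]
  have hndk : (PySem.Dict.mk xs).keys.Nodup := by rw [hkeys]; exact hnd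
  have hget : ∀ p ∈ xs, (PySem.Dict.mk xs).getD p.1 [] = p.2 := by
    intro p hp
    exact PySem.Dict.getD_of_mem_items (d := PySem.Dict.mk xs)
      (by simpa using hp) hndk []
  have hslice : ∀ k : Nat,
      PySem.List.slice (PySem.Dict.mk xs).keys none (some (k : Int)) ++
      PySem.List.slice (PySem.Dict.mk xs).keys (some ((k : Int) + 1)) none
      = (PySem.Dict.mk xs).keys.take k ++ (PySem.Dict.mk xs).keys.drop (k + 1) := by
    intro k
    have h1 : ((k : Int) + 1) = ((k + 1 : Nat) : Int) := by push_cast; ring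
    rw [PySem.List.slice_to_natCast, h1, PySem.List.slice_from_natCast]
  rw [mem_foldl_step _ _
      (fun is w => ∃ o ∈ PySem.List.slice (PySem.Dict.mk xs).keys none (some is.1) ++
          PySem.List.slice (PySem.Dict.mk xs).keys (some (is.1 + 1)) none,
        w ∈ ((PySem.Dict.mk xs).getD is.2 []).map (fun q => q.1) ∧
        w ∈ ((PySem.Dict.mk xs).getD o []).map (fun q => q.1))
      (by
        intro c a w'
        rw [mem_foldl_step _ _
          (fun o w' => w' ∈ ((PySem.Dict.mk xs).getD a.2 []).map (fun q => q.1) ∧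
            w' ∈ ((PySem.Dict.mk xs).getD o []).map (fun q => q.1))
          (by
            intro c' o w''
            rw [PySem.Set.mem_update]
            simp [PySem.Set.mem_inter, PySem.Set.mem_ofList])
          c w']) PySem.Set.empty w]
  rw [show (2 ≤ pvCnt xs w) ↔ _ from two_le_countP_iff xs hnd _]
  constructor
  · rintro (h | ⟨is, his, o, ho, hw1, hw2⟩)
    · exact absurd h (List.not_mem_nil)
    · obtain ⟨k, hk, h1, h2⟩ := (mem_enumerate _ _ _).1 his
      rw [show is.1 = ((k : Nat) : Int) by omega, hslice k,
        mem_eraseIdx_nodup _ k hk hndk] at ho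
      obtain ⟨hok, hone⟩ := ho
      have hkk : (PySem.Dict.mk xs).keys[k] ∈ xs.map (fun p => p.1) := by
        rw [← hkeys]; exact List.getElem_mem hk
      rw [hkeys] at hok
      rw [List.mem_map] at hkk hok
      obtain ⟨p, hp, hp1⟩ := hkk
      obtain ⟨q, hq, hq1⟩ := hok
      refine ⟨p, hp, q, hq, ?_, ?_, ?_⟩
      · exact fun h => hone (by rw [← hq1, ← h, hp1])
      · rw [h2, ← hp1, hget p hp] at hw1; simpa using hw1
      · rw [← hq1, hget q hq] at hw2; simpa using hw2
  · rintro ⟨p, hp, q, hq, hne, h1, h2⟩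
    right
    have hp1 : p.1 ∈ (PySem.Dict.mk xs).keys := by
      rw [hkeys]; exact List.mem_map.2 ⟨p, hp, rfl⟩
    have hq1 : q.1 ∈ (PySem.Dict.mk xs).keys := by
      rw [hkeys]; exact List.mem_map.2 ⟨q, hq, rfl⟩
    obtain ⟨k, hk, hkeq⟩ := List.getElem_of_mem hp1
    refine ⟨((k : Int), p.1), (mem_enumerate _ _ _).2 ⟨k, hk, by simp, hkeq.symm⟩, q.1, ?_, ?_, ?_⟩
    · show q.1 ∈ PySem.List.slice (PySem.Dict.mk xs).keys none (some ((k:Int))) ++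
        PySem.List.slice (PySem.Dict.mk xs).keys (some (((k:Int)) + 1)) none
      rw [hslice k, mem_eraseIdx_nodup _ k hk hndk]
      exact ⟨hq1, by rw [hkeq]; exact fun h => hne h.symm⟩
    · show w ∈ ((PySem.Dict.mk xs).getD p.1 []).map (fun q => q.1)
      rw [hget p hp]; simpa using h1
    · rw [hget q hq]; simpa using h2

theorem ports_agree (xs : List (String × List (String × Int)))
    (hnd : (xs.map (fun p => p.1)).Nodup) :
    get_exclusive_important_words xs = get_exclusive_important_words_alt xs := by
  simp only [get_exclusive_important_words, get_exclusive_important_words_alt]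
  congr 1
  apply PySem.List.foldl_congr_mem
  intro acc p hp
  congr 1
  refine congrArg (fun l => PySem.List.slice l none (some 10)) ?_
  refine congrArg (fun l => PySem.List.sorted l (fun (q : String × Int) => q.2) true) ?_
  apply List.filter_congr
  intro q hq
  have hmem : q.1 ∈ p.2.map (fun q => q.1) := List.mem_map.2 ⟨q, hq, rfl⟩
  have h3 : 1 ≤ pvCnt xs q.1 :=
    List.countP_pos_iff.2 ⟨p, hp, by simpa using hmem⟩
  have h2 := counts_getD xs PySem.Dict.empty q.1
  rw [PySem.Dict.getD_empty] at h2
  rw [h2]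
  have h1 := (PySem.Set.contains_iff _ q.1).trans (common_iff xs hnd q.1)
  by_cases hc : 2 ≤ pvCnt xs q.1
  · have : _ = true := h1.2 hc
    rw [this]
    have : ¬ ((pvCnt xs q.1 : Int) = 1) := by omega
    simp [this]
  · rw [Bool.eq_false_iff.2 (fun ht => hc (h1.1 ht))]
    have : (pvCnt xs q.1 : Int) = 1 := by omega
    simp [this]

-- ===== VERDICT =====
theorem get_exclusive_important_words_spec : Claim_equal_get_exclusive_important_words := by
  intro xs _hdom hpre
  exact ports_agree xs hpre
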